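-- pv_equiv track=rewrite | github.com/sepehrhh/wfms | model.py | get_min_needed_containers_count
-- ===== SOURCE A (Python) =====
-- from collections import OrderedDict
--
-- def get_min_needed_containers_count(node_levels, parallel_chains):
--     min_needed_containers_count = 1
--     level_nodes = OrderedDict()
--     for node, level in node_levels.items():
--         if level not in level_nodes:
--             level_nodes[level] = []
--         level_nodes[level].append(node)
--     level_nodes = OrderedDict(sorted(level_nodes.items(), key=lambda item: item[0]))
--     for level in level_nodes:
--         min_level_needed_containers_count = len(level_nodes[level]) + len(level_nodes.get(level + 1, []))
--         if min_level_needed_containers_count >= min_needed_containers_count: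
--             min_needed_containers_count = min_level_needed_containers_count
--     return min_needed_containers_count if len(parallel_chains) < min_needed_containers_count else\
--         len(parallel_chains)
-- ===== SOURCE B (Python) =====
-- def get_min_needed_containers_count(node_levels, parallel_chains):
--     vals = sorted(node_levels.values())
--     n = len(vals)
--     best = 1
--     i = 0
--     while i < n:
--         l = vals[i]
--         j = i
--         while j < n and vals[j] <= l + 1:
--             j += 1
--         if j - i > best:
--             best = j - i
--         while i < n and vals[i] == l:
--             i += 1
--     return max(best, len(parallel_chains))
-- ===== Notes on version B (the rewrite author's own statement) =====
-- stated objective: alternative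
-- what changed: Replaces A's level->nodes grouping dict with adjacent-key lookups by sorting the flat list of level values and sliding a two-pointer window over it: at each distinct value l the window of values <= l+1 has length count(l)+count(l+1), and the running maximum (seeded at 1) is finally compared with len(parallel_chains).
import Mathlib
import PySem

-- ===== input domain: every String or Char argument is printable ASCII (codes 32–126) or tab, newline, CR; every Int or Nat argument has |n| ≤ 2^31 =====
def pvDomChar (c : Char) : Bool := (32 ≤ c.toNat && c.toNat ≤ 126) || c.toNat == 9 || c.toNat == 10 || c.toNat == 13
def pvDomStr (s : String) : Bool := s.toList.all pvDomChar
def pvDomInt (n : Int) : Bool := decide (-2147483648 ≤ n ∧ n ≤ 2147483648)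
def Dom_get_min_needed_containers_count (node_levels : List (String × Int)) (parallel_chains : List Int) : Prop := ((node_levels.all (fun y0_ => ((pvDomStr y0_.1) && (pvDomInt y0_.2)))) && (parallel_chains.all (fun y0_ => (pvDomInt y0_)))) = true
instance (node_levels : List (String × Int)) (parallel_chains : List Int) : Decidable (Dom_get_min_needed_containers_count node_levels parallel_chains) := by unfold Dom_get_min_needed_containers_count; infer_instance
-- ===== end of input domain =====

-- B drops A's level->nodes grouping dict and its adjacent-key lookups: it sorts the flat list of level
-- values and slides a window over the sorted list (at each distinct value l, the window of values ≤ l+1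
-- starting at l's first occurrence has length count(l)+count(l+1)), keeping a running maximum.

-- ===== PORT A =====
-- the grouping step of A's first loop: 'if level not in level_nodes: level_nodes[level] = []' then append
def pvGroupStep (d : PySem.Dict Int (List String)) (p : String × Int) : PySem.Dict Int (List String) :=
  let d' := if d.contains p.2 then d else d.insert p.2 []
  d'.insert p.2 (d'.getD p.2 [] ++ [p.1])

def get_min_needed_containers_count (node_levels : List (String × Int)) (parallel_chains : List Int) : Int :=
  let level_nodes : PySem.Dict Int (List String) := node_levels.foldl pvGroupStep PySem.Dict.empty
  let level_nodes := PySem.Dict.mk (PySem.List.sorted level_nodes.items (fun it => it.1) false)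
  let m : Int := level_nodes.keys.foldl (fun acc level =>
      let c : Int := ((level_nodes.getD level []).length : Int) + ((level_nodes.getD (level + 1) []).length : Int)
      if c ≥ acc then c else acc) 1
  if (parallel_chains.length : Int) < m then m else (parallel_chains.length : Int)

-- ===== PORT B =====
-- Source B's outer 'while i < n' loop over the sorted values, transcribed as recursion on the remaining
-- suffix vals[i:]: the inner 'while j < n and vals[j] <= l + 1' count j-i is the takeWhile length on the
-- suffix, and the advance 'while i < n and vals[i] == l' is the dropWhile on the suffix.
def pvScan : List Int → Int → Int
  | [], best => best
  | l :: t, best =>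
      let w : Int := (((l :: t).takeWhile (fun v => decide (v ≤ l + 1))).length : Int)
      pvScan ((l :: t).dropWhile (fun v => v == l)) (if w > best then w else best)
  termination_by xs _ => xs.length
  decreasing_by
    simp only [List.dropWhile, beq_self_eq_true, List.length_cons]
    exact Nat.lt_succ_of_le (List.length_dropWhile_le _ _)

def get_min_needed_containers_count_alt (node_levels : List (String × Int)) (parallel_chains : List Int) : Int :=
  let vals := PySem.List.sorted (node_levels.map (·.2)) (fun x => x) false
  let best := pvScan vals 1
  max best (parallel_chains.length : Int)

-- ===== PRECONDITION & SPEC =====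
def Spec_get_min_needed_containers_count (node_levels : List (String × Int)) (parallel_chains : List Int) (out : Int) : Prop := out = get_min_needed_containers_count_alt node_levels parallel_chains
instance (node_levels : List (String × Int)) (parallel_chains : List Int) (out : Int) : Decidable (Spec_get_min_needed_containers_count node_levels parallel_chains out) := by unfold Spec_get_min_needed_containers_count; infer_instance

-- ===== CLAIM (what is proved, stated in full; the proofs are below) =====
def Claim_equal_get_min_needed_containers_count : Prop := ∀ (node_levels : List (String × Int)) (parallel_chains : List Int), Dom_get_min_needed_containers_count node_levels parallel_chains → Spec_get_min_needed_containers_count node_levels parallel_chains (get_min_needed_containers_count node_levels parallel_chains)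

-- ===== LEMMAS AND PROOFS =====

-- ---- A-side: the grouping loop computes, per level, the list of its nodes ----
theorem step_getD (d : PySem.Dict Int (List String)) (p : String × Int) (l : Int) :
    (pvGroupStep d p).getD l [] = if l = p.2 then d.getD p.2 [] ++ [p.1] else d.getD l [] := by
  unfold pvGroupStep
  by_cases h : d.contains p.2 = true
  · simp [h, PySem.Dict.getD_insert]
  · simp only [Bool.not_eq_true] at h
    simp only [h, Bool.false_eq_true, if_false, PySem.Dict.getD_insert,
      PySem.Dict.getD_of_not_contains d _ h]
    split_ifs <;> simp

theorem step_keys (d : PySem.Dict Int (List String)) (p : String × Int) :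
    (pvGroupStep d p).keys = PySem.Set.add d.keys p.2 := by
  unfold pvGroupStep
  by_cases h : d.contains p.2 = true
  · rw [PySem.Set.add_of_mem ((PySem.Dict.contains_iff_mem_keys d p.2).1 h)]
    simp only [h, if_true]
    exact PySem.Dict.keys_insert_of_contains d _ h
  · simp only [Bool.not_eq_true] at h
    have hm : p.2 ∉ d.keys := by
      rw [← PySem.Dict.contains_iff_mem_keys]; simp [h]
    rw [PySem.Set.add_of_not_mem hm]
    simp only [h, Bool.false_eq_true, if_false]
    rw [PySem.Dict.keys_insert_of_contains _ _ (PySem.Dict.contains_insert_self d p.2 []),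
        PySem.Dict.keys_insert_of_not_contains d _ h]

theorem fold_getD (xs : List (String × Int)) (d : PySem.Dict Int (List String)) (l : Int) :
    ((xs.foldl pvGroupStep d).getD l []).length = (d.getD l []).length + (xs.map (·.2)).count l := by
  induction xs generalizing d with
  | nil => simp
  | cons p xs ih =>
    simp only [List.foldl_cons, ih, step_getD, List.map_cons]
    by_cases h : l = p.2
    · subst h; simp; omega
    · simp [h, Ne.symm h]

theorem fold_keys (xs : List (String × Int)) (d : PySem.Dict Int (List String)) :
    (xs.foldl pvGroupStep d).keys = PySem.Set.update d.keys (xs.map (·.2)) := by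
  induction xs generalizing d with
  | nil => simp [PySem.Set.update]
  | cons p xs ih => simp [PySem.Set.update, step_keys, ih]

-- reordering a Nodup-keyed dict's items leaves every lookup unchanged
theorem getD_sorted (d : PySem.Dict Int (List String)) (hnd : d.keys.Nodup) (l : Int) :
    (PySem.Dict.mk (PySem.List.sorted d.items (fun it => it.1) false)).getD l [] = d.getD l [] := by
  set sd := PySem.Dict.mk (PySem.List.sorted d.items (fun it => it.1) false) with hsd
  have hperm : sd.items.Perm d.items := PySem.List.sorted_perm _ _ _
  have hkeys : sd.keys.Perm d.keys := by
    simpa only [PySem.Dict.keys] using hperm.map (·.1)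
  have hnds : sd.keys.Nodup := hkeys.nodup_iff.2 hnd
  cases hg : d.get? l with
  | none =>
    have h1 : l ∉ d.keys := (PySem.Dict.get?_eq_none_iff_not_mem_keys d l).1 hg
    have h2 : l ∉ sd.keys := fun hm => h1 (hkeys.mem_iff.1 hm)
    rw [PySem.Dict.getD_of_not_contains sd _ (by
        rw [PySem.Dict.contains_eq_decide_mem_keys]; simp [h2]),
      PySem.Dict.getD_of_not_contains d _ (by
        rw [PySem.Dict.contains_eq_decide_mem_keys]; simp [h1])]
  | some v =>
    have h1 : (l, v) ∈ d.items := PySem.Dict.mem_items_of_get?_eq_some d hg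
    have h2 : (l, v) ∈ sd.items := hperm.mem_iff.2 h1
    rw [PySem.Dict.getD_of_mem_items sd h2 hnds, PySem.Dict.getD_of_mem_items d h1 hnd]

-- ---- B-side: on a sorted suffix whose head l is minimal, the window and the advance ----
theorem takeWhile_sorted_len (l : Int) (xs : List Int) (hs : xs.Pairwise (· ≤ ·))
    (hge : ∀ v ∈ xs, l ≤ v) :
    (xs.takeWhile (fun v => decide (v ≤ l + 1))).length = xs.count l + xs.count (l + 1) := by
  induction xs with
  | nil => simp
  | cons h t ih =>
    have hlh : l ≤ h := hge h (by simp)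
    rw [List.pairwise_cons] at hs
    by_cases hle : h ≤ l + 1
    · have ht := ih hs.2 (fun v hv => hge v (by simp [hv]))
      simp only [List.takeWhile, hle, decide_true, List.length_cons, List.count_cons, ht]
      have : h = l ∨ h = l + 1 := by omega
      rcases this with h1 | h1 <;> subst h1 <;> simp <;> omega
    · have hall : ∀ v ∈ h :: t, ¬ v ≤ l + 1 := by
        intro v hv
        rcases List.mem_cons.1 hv with rfl | hv
        · exact hle
        · have := hs.1 v hv; omega
      have c1 : (h :: t).count l = 0 := by
        rw [List.count_eq_zero]; intro hm; exact hall l hm (by omega)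
      have c2 : (h :: t).count (l + 1) = 0 := by
        rw [List.count_eq_zero]; intro hm; exact hall (l + 1) hm (by omega)
      simp only [List.takeWhile, hle, decide_false, List.length_nil, c1, c2]

theorem dropWhile_sorted_filter (l : Int) (xs : List Int) (hs : xs.Pairwise (· ≤ ·))
    (hge : ∀ v ∈ xs, l ≤ v) :
    xs.dropWhile (fun v => v == l) = xs.filter (fun v => !(v == l)) := by
  induction xs with
  | nil => simp
  | cons h t ih =>
    rw [List.pairwise_cons] at hs
    by_cases he : h = l
    · subst he
      simp only [List.dropWhile, beq_self_eq_true, List.filter_cons, Bool.not_true,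
        Bool.false_eq_true, if_false]
      exact ih hs.2 (fun v hv => hge v (by simp [hv]))
    · have hne : (h == l) = false := by simp [he]
      have hkeep : t.filter (fun v => !(v == l)) = t := by
        apply List.filter_eq_self.2
        intro v hv
        have h1 := hs.1 v hv
        have h2 := hge h (by simp)
        have h3 : v ≠ l := by omega
        simp [h3]
      simp [List.dropWhile, hne, hkeep]

-- pvScan on a sorted list is the fold of the per-distinct-value window sizes
theorem scan_eq (xs : List Int) (hs : xs.Pairwise (· ≤ ·)) (b : Int) :
    pvScan xs b = (PySem.List.dedup xs).foldl
      (fun acc v => max acc ((xs.count v : Int) + (xs.count (v + 1) : Int))) b := by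
  induction hn : xs.length using Nat.strong_induction_on generalizing xs b with
  | _ n ih =>
    cases xs with
    | nil => simp [pvScan]
    | cons l t =>
      have hpc := List.pairwise_cons.1 hs
      have hge : ∀ v ∈ l :: t, l ≤ v := by
        intro v hv
        rcases List.mem_cons.1 hv with rfl | hv
        · exact le_refl v
        · exact hpc.1 v hv
      have hW := takeWhile_sorted_len l (l :: t) hs hge
      have hD := dropWhile_sorted_filter l (l :: t) hs hge
      set rest := (l :: t).filter (fun v => !(v == l)) with hrest
      have hrs : rest.Pairwise (· ≤ ·) := List.Pairwise.sublist List.filter_sublist hs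
      have hrgt : ∀ v ∈ rest, l < v := by
        intro v hv
        rw [hrest, List.mem_filter] at hv
        have h1 := hge v hv.1
        have h2 : v ≠ l := by simpa using hv.2
        omega
      have hlen : rest.length < n := by
        have h1 : (l :: t).dropWhile (fun v => v == l) = t.dropWhile (fun v => v == l) := by
          simp [List.dropWhile]
        have h2 : rest.length ≤ t.length := by
          rw [← hD, h1]; exact List.length_dropWhile_le _ _
        have h3 : n = t.length + 1 := by simpa using hn.symm
        omega
      have hcnt : ∀ v : Int, v ≠ l → rest.count v = (l :: t).count v := by
        intro v hv
        exact List.count_filter (by simpa using hv)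
      -- one step of pvScan
      have hstep : pvScan (l :: t) b
          = pvScan rest (if (((l :: t).takeWhile (fun v => decide (v ≤ l + 1))).length : Int) > b
              then (((l :: t).takeWhile (fun v => decide (v ≤ l + 1))).length : Int) else b) := by
        rw [pvScan, hD]
      rw [hstep, ih rest.length hlen rest hrs _ rfl]
      -- rewrite counts-in-rest to counts-in-(l::t) on the members of dedup rest
      have hcongr : (PySem.List.dedup rest).foldl
            (fun acc v => max acc ((rest.count v : Int) + (rest.count (v + 1) : Int)))
            (if (((l :: t).takeWhile (fun v => decide (v ≤ l + 1))).length : Int) > b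
              then (((l :: t).takeWhile (fun v => decide (v ≤ l + 1))).length : Int) else b)
          = (PySem.List.dedup rest).foldl
            (fun acc v => max acc (((l :: t).count v : Int) + ((l :: t).count (v + 1) : Int)))
            (if (((l :: t).takeWhile (fun v => decide (v ≤ l + 1))).length : Int) > b
              then (((l :: t).takeWhile (fun v => decide (v ≤ l + 1))).length : Int) else b) := by
        apply PySem.List.foldl_congr_mem
        intro acc v hv
        have hvm : v ∈ rest := (PySem.List.mem_dedup _ _).1 hv
        have h1 := hrgt v hvm
        rw [hcnt v (by omega), hcnt (v + 1) (by omega)]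
      rw [hcongr]
      -- dedup (l :: t) is a permutation of l :: dedup rest
      have hmemr : ∀ a : Int, a ∈ rest ↔ a ∈ l :: t ∧ a ≠ l := by
        intro a; rw [hrest, List.mem_filter]; simp
      have hperm : (PySem.List.dedup (l :: t)).Perm (l :: PySem.List.dedup rest) := by
        apply (List.perm_ext_iff_of_nodup (PySem.List.nodup_dedup _) ?_).mpr
        · intro a
          simp only [PySem.List.mem_dedup, List.mem_cons, hmemr]
          constructor
          · rintro (rfl | ha)
            · exact Or.inl rfl
            · by_cases h : a = l
              · exact Or.inl h
              · exact Or.inr ⟨Or.inr ha, h⟩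
          · rintro (rfl | ⟨ha, _⟩)
            · exact Or.inl rfl
            · exact ha
        · refine List.nodup_cons.2 ⟨?_, PySem.List.nodup_dedup _⟩
          intro hl
          have := hrgt l ((PySem.List.mem_dedup _ _).1 hl)
          omega
      have hfold := @List.Perm.foldl_eq Int Int
          (fun acc v => max acc (((l :: t).count v : Int) + ((l :: t).count (v + 1) : Int)))
          _ _ ⟨fun b a1 a2 => by omega⟩ hperm b
      rw [hfold]
      simp only [List.foldl_cons]
      congr 1
      rw [hW]
      push_cast
      omega

-- ===== VERDICT (by name: the statement is the Claim_ definition above) =====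
theorem get_min_needed_containers_count_spec : Claim_equal_get_min_needed_containers_count := by
  intro node_levels parallel_chains _
  unfold Spec_get_min_needed_containers_count
  unfold get_min_needed_containers_count get_min_needed_containers_count_alt
  simp only
  set levels := node_levels.map (·.2) with hlv
  set d := node_levels.foldl pvGroupStep PySem.Dict.empty with hd
  set sd := PySem.Dict.mk (PySem.List.sorted d.items (fun it => it.1) false) with hsd
  have hkeys : d.keys = PySem.Set.ofList levels := by
    rw [hd, fold_keys]
    simp [PySem.Set.update, PySem.Set.ofList_eq_foldl, PySem.Dict.keys]
    rfl
  have hnd : d.keys.Nodup := by rw [hkeys]; exact PySem.Set.nodup_ofList levels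
  have hcnt : ∀ l : Int, ((sd.getD l []).length : Int) = (levels.count l : Int) := by
    intro l
    rw [hsd, getD_sorted d hnd l, hd, fold_getD]
    simp
    rw [hlv]
  have hperm : sd.keys.Perm (PySem.List.dedup levels) := by
    have : sd.items.Perm d.items := PySem.List.sorted_perm _ _ _
    have hk : sd.keys.Perm d.keys := by
      simpa only [PySem.Dict.keys] using this.map (·.1)
    rw [hkeys] at hk
    simpa [PySem.List.dedup_eq_ofList] using hk
  -- A's running maximum is 'foldl max' of count(l)+count(l+1) over the distinct levels
  have stepA : ∀ (acc l : Int),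
      (if (((sd.getD l []).length : Int) + ((sd.getD (l + 1) []).length : Int)) ≥ acc
        then (((sd.getD l []).length : Int) + ((sd.getD (l + 1) []).length : Int)) else acc)
      = max acc ((levels.count l : Int) + (levels.count (l + 1) : Int)) := by
    intro acc l; rw [hcnt l, hcnt (l + 1)]; omega
  have hAfold : sd.keys.foldl (fun acc level =>
        if (((sd.getD level []).length : Int) + ((sd.getD (level + 1) []).length : Int)) ≥ acc
        then (((sd.getD level []).length : Int) + ((sd.getD (level + 1) []).length : Int)) else acc) 1
      = sd.keys.foldl (fun acc l => max acc ((levels.count l : Int) + (levels.count (l + 1) : Int))) 1 :=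
    PySem.List.foldl_congr_mem _ _ _ _ (fun acc x _ => stepA acc x)
  have hmaxA : sd.keys.foldl (fun acc l => max acc ((levels.count l : Int) + (levels.count (l + 1) : Int))) 1
      = (PySem.List.dedup levels).foldl (fun acc l => max acc ((levels.count l : Int) + (levels.count (l + 1) : Int))) 1 :=
    @List.Perm.foldl_eq _ _ _ _ _ ⟨fun b a1 a2 => by omega⟩ hperm 1
  -- B's scan over the sorted values is the same fold
  set vals := PySem.List.sorted levels (fun x => x) false with hvals
  have hvp : vals.Perm levels := PySem.List.sorted_perm _ _ _
  have hvs : vals.Pairwise (· ≤ ·) := by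
    simpa using PySem.List.sorted_pairwise levels (fun x => x)
  have hscan := scan_eq vals hvs 1
  have hcongrB : (PySem.List.dedup vals).foldl
        (fun acc v => max acc ((vals.count v : Int) + (vals.count (v + 1) : Int))) 1
      = (PySem.List.dedup vals).foldl
        (fun acc v => max acc ((levels.count v : Int) + (levels.count (v + 1) : Int))) 1 := by
    apply PySem.List.foldl_congr_mem
    intro acc v _
    rw [hvp.count_eq, hvp.count_eq]
  have hpermd : (PySem.List.dedup vals).Perm (PySem.List.dedup levels) := by
    apply (List.perm_ext_iff_of_nodup (PySem.List.nodup_dedup _) (PySem.List.nodup_dedup _)).mpr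
    intro a
    simp only [PySem.List.mem_dedup]
    exact hvp.mem_iff
  have hmaxB : (PySem.List.dedup vals).foldl
        (fun acc l => max acc ((levels.count l : Int) + (levels.count (l + 1) : Int))) 1
      = (PySem.List.dedup levels).foldl (fun acc l => max acc ((levels.count l : Int) + (levels.count (l + 1) : Int))) 1 :=
    @List.Perm.foldl_eq _ _ _ _ _ ⟨fun b a1 a2 => by omega⟩ hpermd 1
  rw [hAfold, hmaxA, hscan, hcongrB, hmaxB]
  set m := (PySem.List.dedup levels).foldl
      (fun acc l => max acc ((levels.count l : Int) + (levels.count (l + 1) : Int))) 1 with hm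
  omega
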